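-- pv_equiv track=rewrite | github.com/IrmaGC/Mision-09 | Mision_09.py | intercambiarParejas
-- ===== SOURCE A (Python) =====
-- def intercambiarParejas (lista): #intercambia de posición los números de 2 en 2
--     listaNueva=[]
--     if len(lista)%2==0: #si el número de datos es par
--         for k in range (0,len(lista)-1,2): #inicia en 0, pero visita los elementos de 2 en 2
--             # en la nueva lista se va a agregar primer el segundo valor, y liego el anterior
--             listaNueva.append(lista[k+1])
--             listaNueva.append(lista[k])
--     #cuando la lista es impar
--     else:
--         if len(lista)>1: #cuando la lista es mayor a 1 elemento
--             for k in range (0,len(lista)-2,2): #visita la lista de 2 en 2 elementos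
--                 # en la nueva lista se va a agregar primer el segundo valor, y liego el anterior
--                 listaNueva.append(lista[k+1])
--                 listaNueva.append(lista[k])
--         #se agrega a la lista nueva el ultimo elemento (el cual no se intercambia)
--         listaNueva.append(lista[-1])
--     return listaNueva
-- ===== SOURCE B (Python) =====
-- def intercambiarParejas(lista):
--     n = len(lista)
--     def destino(i):
--         j = i + 1 if i % 2 == 0 else i - 1
--         return j if j < n else i
--     return [lista[destino(i)] for i in range(n)]
-- ===== Notes on version B (the rewrite author's own statement) =====
-- stated objective: alternative
-- what changed: B builds the output directly by the closed-form index permutation i -> i+1 (even i) / i-1 (odd i), identity when the partner index falls outside the list; there is no swapping, no append loops and no branch on the length's parity.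
import Mathlib
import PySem

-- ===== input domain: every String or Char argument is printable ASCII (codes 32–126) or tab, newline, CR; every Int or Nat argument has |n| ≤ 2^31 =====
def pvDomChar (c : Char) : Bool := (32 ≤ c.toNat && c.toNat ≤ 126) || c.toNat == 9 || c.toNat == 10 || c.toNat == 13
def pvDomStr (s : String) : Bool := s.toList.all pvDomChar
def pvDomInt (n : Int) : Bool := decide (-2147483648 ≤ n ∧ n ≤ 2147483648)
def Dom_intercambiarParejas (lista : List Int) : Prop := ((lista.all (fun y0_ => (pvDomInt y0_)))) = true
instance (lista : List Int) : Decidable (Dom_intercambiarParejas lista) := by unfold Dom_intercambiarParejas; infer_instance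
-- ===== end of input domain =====

-- B builds the output by the closed-form index permutation i->i+1/i-1 (partner kept in range), replacing A's swap-append loops and parity branch (alternative algorithm, same cost).


-- ===== PORT A =====
def intercambiarParejas (lista : List Int) : List Int :=
  let listaNueva : List Int := []
  if PySem.Int.mod (PySem.List.len lista) 2 = 0 then
    (PySem.List.pyRange 0 (PySem.List.len lista - 1) 2).foldl
      (fun listaNueva k =>
        (listaNueva ++ [PySem.List.pyGetD lista (k + 1) 0]) ++ [PySem.List.pyGetD lista k 0])
      listaNueva
  else
    let listaNueva :=
      if PySem.List.len lista > 1 then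
        (PySem.List.pyRange 0 (PySem.List.len lista - 2) 2).foldl
          (fun listaNueva k =>
            (listaNueva ++ [PySem.List.pyGetD lista (k + 1) 0]) ++ [PySem.List.pyGetD lista k 0])
          listaNueva
      else listaNueva
    listaNueva ++ [PySem.List.pyGetD lista (-1) 0]

-- ===== PORT B =====
-- destino(i): the partner index i+1 (even i) / i-1 (odd i), or i itself when the partner is out of range
def destinoB (n i : Int) : Int :=
  let j := if PySem.Int.mod i 2 = 0 then i + 1 else i - 1
  if j < n then j else i

def intercambiarParejas_alt (lista : List Int) : List Int :=
  let n := PySem.List.len lista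
  (PySem.List.pyRange 0 n 1).map (fun i => PySem.List.pyGetD lista (destinoB n i) 0)

-- ===== PRECONDITION & SPEC =====
def Spec_intercambiarParejas (lista : List Int) (out : List Int) : Prop := out = intercambiarParejas_alt lista
instance (lista : List Int) (out : List Int) : Decidable (Spec_intercambiarParejas lista out) := by unfold Spec_intercambiarParejas; infer_instance

-- ===== CLAIM (what is proved, stated in full; the proofs are below) =====
def Claim_equal_intercambiarParejas : Prop := ∀ (lista : List Int), Dom_intercambiarParejas lista → Spec_intercambiarParejas lista (intercambiarParejas lista)

-- ===== LEMMAS AND PROOFS =====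

-- the common specification both ports are proved equal to: swap adjacent pairs, keep an unpaired last element
def swapPairs : List Int → List Int
  | x :: y :: r => y :: x :: swapPairs r
  | l => l

-- range of a stepped loop as a mapped List.range

theorem range2 (L : Nat) :
    PySem.List.pyRange 0 ((L : Int) - 1) 2
      = (List.range (L / 2)).map (fun k => ((2 * k : Nat) : Int)) := by
  rw [PySem.List.pyRange_of_pos _ _ (by norm_num)]
  have hc : (if (0:Int) < (L:Int) - 1 then (((L:Int) - 1 - 0 + 2 - 1) / 2).toNat else 0) = L / 2 := by
    split <;> omega
  rw [hc]
  apply List.map_congr_left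
  intro k _
  push_cast; ring

theorem range2' (L : Nat) :
    PySem.List.pyRange 0 ((L : Int) - 2) 2
      = (List.range ((L - 1) / 2)).map (fun k => ((2 * k : Nat) : Int)) := by
  rw [PySem.List.pyRange_of_pos _ _ (by norm_num)]
  have hc : (if (0:Int) < (L:Int) - 2 then (((L:Int) - 2 - 0 + 2 - 1) / 2).toNat else 0) = (L - 1) / 2 := by
    split <;> omega
  rw [hc]
  apply List.map_congr_left
  intro k _
  push_cast; ring

def pairsOf (xs : List Int) (m : Nat) : List Int :=
  ((List.range m).map (fun k => ((2 * k : Nat) : Int))).flatMap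
    (fun i => [PySem.List.pyGetD xs (i + 1) 0, PySem.List.pyGetD xs i 0])

theorem pairsOf_cons_cons (x y : Int) (r : List Int) (m : Nat) :
    pairsOf (x :: y :: r) (m + 1) = y :: x :: pairsOf r m := by
  rw [pairsOf, List.range_succ_eq_map, List.map_cons, List.map_map, List.flatMap_cons]
  have h1 : PySem.List.pyGetD (x :: y :: r) (((2*0:Nat):Int) + 1) 0 = y := by
    rw [show ((2*0:Nat):Int) + 1 = ((1:Nat):Int) by norm_num, PySem.List.pyGetD_natCast]; rfl
  have h2 : PySem.List.pyGetD (x :: y :: r) ((2*0:Nat):Int) 0 = x := by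
    rw [PySem.List.pyGetD_natCast]; rfl
  rw [h1, h2]
  simp only [List.cons_append, List.nil_append, pairsOf]
  congr 1; congr 1
  rw [List.flatMap_map, List.flatMap_map]
  apply List.flatMap_congr
  intro k _
  simp only [Function.comp_apply]
  have g2 : ((2 * Nat.succ k : Nat) : Int) = ((2*k+2 : Nat) : Int) := by push_cast; ring
  have g1 : ((2*k+2 : Nat) : Int) + 1 = ((2*k+3 : Nat) : Int) := by push_cast; ring
  have g0 : ((2*k : Nat) : Int) + 1 = ((2*k+1 : Nat) : Int) := by push_cast; ring
  rw [g2, g1, g0]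
  simp only [PySem.List.pyGetD_natCast]
  simp [List.getD]

theorem foldl_two_append (idx : List Int) (g1 g2 : Int → Int) (acc : List Int) :
    idx.foldl (fun acc k => (acc ++ [g1 k]) ++ [g2 k]) acc
      = acc ++ idx.flatMap (fun k => [g1 k, g2 k]) := by
  have h : (fun (acc : List Int) k => (acc ++ [g1 k]) ++ [g2 k])
      = fun acc k => acc ++ [g1 k, g2 k] := by
    funext acc k; simp
  rw [h, PySem.List.foldl_append_eq_flatMap]

theorem A_even_fold (ys : List Int) (m : Nat) :
    ((List.range m).map (fun k => ((2 * k : Nat) : Int))).foldl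
      (fun acc k => (acc ++ [PySem.List.pyGetD ys (k + 1) 0]) ++ [PySem.List.pyGetD ys k 0]) []
      = pairsOf ys m := by
  rw [foldl_two_append]
  simp [pairsOf]

theorem len_cast (ys : List Int) : PySem.List.len ys = ((ys.length : Nat) : Int) := by
  simp [PySem.List.len_eq]

theorem destinoB_shift (m k : Int) (hm : k < m) :
    destinoB (m + 2) (k + 2) = destinoB m k + 2 := by
  unfold destinoB
  have he : PySem.Int.mod (k + 2) 2 = PySem.Int.mod k 2 := by
    rw [PySem.Int.mod_eq_emod_of_pos (by norm_num), PySem.Int.mod_eq_emod_of_pos (by norm_num)]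
    omega
  rw [he]
  by_cases hp : PySem.Int.mod k 2 = 0
  · have hp' : k % 2 = 0 := by
      rw [PySem.Int.mod_eq_emod_of_pos (by norm_num)] at hp; exact hp
    simp only [hp, reduceIte]
    split_ifs <;> omega
  · have hp' : ¬ k % 2 = 0 := by
      rw [PySem.Int.mod_eq_emod_of_pos (by norm_num)] at hp; exact hp
    simp only [hp, reduceIte]
    split_ifs <;> omega

theorem destinoB_range (m k : Int) (h0 : 0 ≤ k) (hm : k < m) :
    0 ≤ destinoB m k ∧ destinoB m k < m := by
  unfold destinoB
  by_cases hp : PySem.Int.mod k 2 = 0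
  · have hp' : k % 2 = 0 := by
      rw [PySem.Int.mod_eq_emod_of_pos (by norm_num)] at hp; exact hp
    simp only [hp, reduceIte]
    split_ifs <;> omega
  · have hp' : ¬ k % 2 = 0 := by
      rw [PySem.Int.mod_eq_emod_of_pos (by norm_num)] at hp; exact hp
    simp only [hp, reduceIte]
    split_ifs <;> omega

-- B written as a map over List.range, with the length explicit
theorem B_unfold (xs : List Int) :
    intercambiarParejas_alt xs
      = (List.range xs.length).map
          (fun k => PySem.List.pyGetD xs (destinoB (xs.length : Int) ((k : Nat) : Int)) 0) := by
  rw [intercambiarParejas_alt]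
  rw [len_cast, PySem.List.pyRange_one, List.map_map]
  have : ((xs.length : Int) - 0).toNat = xs.length := by omega
  rw [this]
  apply List.map_congr_left
  intro k _
  simp

theorem range_add_two (m : Nat) :
    List.range (m + 2) = 0 :: 1 :: (List.range m).map (fun k => k + 2) := by
  rw [show m + 2 = (m + 1) + 1 from rfl, List.range_succ_eq_map, List.range_succ_eq_map,
    List.map_cons, List.map_map]
  rfl

theorem B_eq (xs : List Int) : intercambiarParejas_alt xs = swapPairs xs := by
  induction xs using swapPairs.induct with
  | case1 x y r ih =>
      rw [B_unfold]
      have hL : (x :: y :: r).length = r.length + 2 := by simp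
      rw [hL, range_add_two, List.map_cons, List.map_cons, List.map_map]
      have hd0 : destinoB ((r.length + 2 : Nat) : Int) ((0 : Nat) : Int) = 1 := by
        unfold destinoB
        have : PySem.Int.mod ((0:Nat):Int) 2 = 0 := by decide
        simp only [this, reduceIte]
        split_ifs with h
        · norm_num
        · exfalso; push_cast at h; omega
      have hd1 : destinoB ((r.length + 2 : Nat) : Int) ((1 : Nat) : Int) = 0 := by
        unfold destinoB
        have : ¬ PySem.Int.mod ((1 : Nat) : Int) 2 = 0 := by decide
        simp only [this, reduceIte]
        split_ifs with h
        · norm_num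
        · exfalso; push_cast at h; omega
      have hg0 : PySem.List.pyGetD (x :: y :: r) (1 : Int) 0 = y := by
        rw [show (1:Int) = ((1:Nat):Int) by norm_num, PySem.List.pyGetD_natCast]; rfl
      have hg1 : PySem.List.pyGetD (x :: y :: r) (0 : Int) 0 = x := by
        rw [show (0:Int) = ((0:Nat):Int) by norm_num, PySem.List.pyGetD_natCast]; rfl
      rw [hd0, hd1, hg0, hg1, swapPairs]
      congr 1; congr 1
      rw [← ih, B_unfold]
      apply List.map_congr_left
      intro k hk
      rw [List.mem_range] at hk
      simp only [Function.comp_apply]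
      have hcast2 : ((k + 2 : Nat) : Int) = ((k : Nat) : Int) + 2 := by push_cast; ring
      have hcastL : ((r.length + 2 : Nat) : Int) = ((r.length : Nat) : Int) + 2 := by
        push_cast; ring
      have hk0 : (0 : Int) ≤ ((k : Nat) : Int) := by positivity
      have hkm : ((k : Nat) : Int) < ((r.length : Nat) : Int) := by exact_mod_cast hk
      rw [hcast2, hcastL, destinoB_shift _ _ hkm]
      obtain ⟨hdl, hdu⟩ := destinoB_range ((r.length : Nat) : Int) ((k : Nat) : Int) hk0 hkm
      set d := destinoB ((r.length : Nat) : Int) ((k : Nat) : Int) with hd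
      rw [PySem.List.pyGetD_eq_getElem _ _ (by omega)
        (by simp only [List.length_cons]; push_cast; omega),
        PySem.List.pyGetD_eq_getElem _ _ hdl (by exact_mod_cast hdu)]
      have ht : (d + 2).toNat = d.toNat + 2 := by omega
      simp [ht]
  | case2 l h =>
      rcases l with _ | ⟨a, _ | ⟨b, t⟩⟩
      · decide
      · rw [B_unfold]
        simp only [List.length_cons, List.length_nil, List.range_succ, List.range_zero,
          List.nil_append, List.map_cons, List.map_nil]
        have hd : destinoB ((0 + 1 : Nat) : Int) ((0 : Nat) : Int) = 0 := by decide
        rw [hd, PySem.List.pyGetD_zero_cons]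
        rfl
      · exact (h a b t rfl).elim

theorem A_eq (xs : List Int) : intercambiarParejas xs = swapPairs xs := by
  induction xs using swapPairs.induct with
  | case1 x y r ih =>
      have hlen : PySem.List.len (x :: y :: r) = (((r.length + 2 : Nat) : Int)) := by
        rw [len_cast]; simp; ring
      have hlr := len_cast r
      have hd1 : (r.length + 2) / 2 = r.length / 2 + 1 := by omega
      rcases Nat.even_or_odd r.length with ⟨t, ht⟩ | ⟨t, ht⟩
      · -- even tail: both take the even branch
        have hm : PySem.Int.mod (PySem.List.len (x :: y :: r)) 2 = 0 := by
          rw [hlen, PySem.Int.mod_eq_emod_of_pos (by norm_num)]; omega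
        have hmr : PySem.Int.mod (PySem.List.len r) 2 = 0 := by
          rw [hlr, PySem.Int.mod_eq_emod_of_pos (by norm_num)]; omega
        rw [intercambiarParejas]
        simp only [hm, reduceIte]
        rw [hlen, range2, hd1, A_even_fold, pairsOf_cons_cons]
        have hr : intercambiarParejas r = pairsOf r (r.length / 2) := by
          rw [intercambiarParejas]
          simp only [hmr, reduceIte]
          rw [hlr, range2, A_even_fold]
        rw [swapPairs, ← ih, hr]
      · -- odd tail
        have hm : ¬ PySem.Int.mod (PySem.List.len (x :: y :: r)) 2 = 0 := by
          rw [hlen, PySem.Int.mod_eq_emod_of_pos (by norm_num)]; omega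
        have h1 : r.length ≥ 1 := by omega
        have hgt : PySem.List.len (x :: y :: r) > 1 := by rw [hlen]; omega
        have hne : r ≠ [] := by intro hh; rw [hh] at h1; simp at h1
        have hd2 : (r.length + 2 - 1) / 2 = r.length / 2 + 1 := by omega
        rw [intercambiarParejas]
        simp only [hm, hgt, reduceIte]
        rw [hlen, range2', hd2, A_even_fold, pairsOf_cons_cons]
        have hlast : PySem.List.pyGetD (x :: y :: r) (-1) 0 = PySem.List.pyGetD r (-1) 0 := by
          rw [PySem.List.pyGetD_neg_one (h := by simp), PySem.List.pyGetD_neg_one (h := hne)]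
          simp [List.getLast_cons, hne]
        have hr : intercambiarParejas r = pairsOf r (r.length / 2) ++ [PySem.List.pyGetD r (-1) 0] := by
          have hmr : ¬ PySem.Int.mod (PySem.List.len r) 2 = 0 := by
            rw [hlr, PySem.Int.mod_eq_emod_of_pos (by norm_num)]; omega
          rw [intercambiarParejas]
          simp only [hmr, reduceIte]
          by_cases hg : r.length > 1
          · have hd3 : (r.length - 1) / 2 = r.length / 2 := by omega
            have hgi : PySem.List.len r > 1 := by rw [hlr]; omega
            simp only [hgi, reduceIte]
            rw [hlr, range2', hd3, A_even_fold]
          · have hr1 : r.length = 1 := by omega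
            have hgi : ¬ PySem.List.len r > 1 := by rw [hlr]; omega
            simp only [hgi, reduceIte]
            have hp0 : pairsOf r (r.length / 2) = [] := by
              rw [hr1]; simp [pairsOf]
            rw [hp0]
        rw [hlast, swapPairs, ← ih, hr]
        simp
  | case2 l h =>
      rcases l with _ | ⟨a, _ | ⟨b, t⟩⟩
      · decide
      · have hl1 : PySem.List.len [a] = (1 : Int) := by rw [len_cast]; simp
        have hm : ¬ PySem.Int.mod (PySem.List.len [a]) 2 = 0 := by
          rw [hl1]; decide
        have hg : ¬ PySem.List.len [a] > 1 := by
          rw [hl1]; decide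
        rw [intercambiarParejas]
        simp only [hm, hg, reduceIte]
        rw [PySem.List.pyGetD_neg_one (h := by simp)]
        rfl
      · exact (h a b t rfl).elim

-- ===== VERDICT (by name: the statement is the Claim_ definition above) =====
theorem intercambiarParejas_spec : Claim_equal_intercambiarParejas := by
  intro lista _
  unfold Spec_intercambiarParejas
  rw [A_eq, B_eq]
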